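-- pv_equiv track=rewrite | github.com/katyjiang/cmpe273-assignment2 | assignment2/score.py | get_user_selection
-- ===== SOURCE A (Python) =====
-- def get_user_selection(line):
--     columns = line.split() # By default split by whitespace
--
--     # define an array to indicate whether we have found "A", "B"
--     # "C", "D", "E"
--     found = [False, False, False, False, False]
--
--     # It should have 5 columns, but sometimes ocr doesn't work
--     # perfectly.
--     for col in columns:
--         if "A" in col:
--             found[0] = True
--         if "B" in col:
--             found[1] = True
--         if "C" in col:
--             found[2] = True
--         if "D" in col:
--             found[3] = True
--         if "E" in col:
--             found[4] = True
--
--     not_found = -1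
--     for i in range(5):
--         if not found[i]:
--             not_found = i
--             break
--
--     if not_found == -1:
--         return "C" # A mysterious theory every student should know :)
--     elif not_found == 0:
--         return "A"
--     elif not_found == 1:
--         return "B"
--     elif not_found == 2:
--         return "C"
--     elif not_found == 3:
--         return "D"
--     elif not_found == 4:
--         return "E"
-- ===== SOURCE B (Python) =====
-- def get_user_selection(line):
--     for letter in "ABCDE":
--         if letter not in line:
--             return letter
--     return "C"
-- ===== Notes on version B (the rewrite author's own statement) =====
-- stated objective: simpler
-- what changed: Replaces the build-a-boolean-table-over-split-columns-then-rescan-then-index-dispatch shape by a single early-exit loop over the literal "ABCDE" testing substring membership in the whole line (a single letter occurs in some whitespace-split column iff it occurs in the line).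
import Mathlib
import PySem

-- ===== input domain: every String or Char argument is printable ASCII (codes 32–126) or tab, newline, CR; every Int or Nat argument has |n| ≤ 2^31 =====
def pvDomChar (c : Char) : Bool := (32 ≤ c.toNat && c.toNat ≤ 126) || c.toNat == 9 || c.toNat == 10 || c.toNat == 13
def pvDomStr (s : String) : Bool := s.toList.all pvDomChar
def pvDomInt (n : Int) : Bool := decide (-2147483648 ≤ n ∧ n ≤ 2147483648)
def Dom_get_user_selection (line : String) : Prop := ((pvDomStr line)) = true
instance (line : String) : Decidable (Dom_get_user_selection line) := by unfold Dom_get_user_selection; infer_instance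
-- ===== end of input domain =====

-- B replaces A's boolean found-table over split columns and index dispatch by one
-- early-exit scan over "ABCDE" testing membership in the whole line (objective: simpler).

-- ===== PORT A =====
-- body of A's first loop: set found[k] for each letter present in the column
def pvStepA (f : List Bool) (col : String) : List Bool :=
  let f := if PySem.Str.isIn "A" col then f.set 0 true else f
  let f := if PySem.Str.isIn "B" col then f.set 1 true else f
  let f := if PySem.Str.isIn "C" col then f.set 2 true else f
  let f := if PySem.Str.isIn "D" col then f.set 3 true else f
  if PySem.Str.isIn "E" col then f.set 4 true else f

-- A's second loop: first i in range(5) with not found[i], else -1 (the break is the early return)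
def pvNotFound (found : List Bool) : List Int → Int
  | [] => -1
  | i :: rest => if !(PySem.List.pyGetD found i false) then i else pvNotFound found rest

def get_user_selection (line : String) : String :=
  let columns := PySem.Str.split₀ line
  let found := columns.foldl pvStepA [false, false, false, false, false]
  let not_found := pvNotFound found (PySem.List.pyRange 0 5 1)
  if not_found == -1 then "C"
  else if not_found == 0 then "A"
  else if not_found == 1 then "B"
  else if not_found == 2 then "C"
  else if not_found == 3 then "D"
  else if not_found == 4 then "E"
  else ""  -- unreachable: not_found ∈ {-1,0,1,2,3,4}

-- ===== PORT B =====
-- B's loop: first letter of "ABCDE" not in the line, else "C"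
def pvFirstMissing (line : List Char) : List Char → String
  | [] => "C"
  | c :: rest => if !(PySem.Chars.isIn [c] line) then String.ofList [c] else pvFirstMissing line rest

def get_user_selection_alt (line : String) : String :=
  pvFirstMissing line.toList "ABCDE".toList

-- ===== PRECONDITION & SPEC =====
def Spec_get_user_selection (line : String) (out : String) : Prop := out = get_user_selection_alt line
instance (line : String) (out : String) : Decidable (Spec_get_user_selection line out) := by unfold Spec_get_user_selection; infer_instance

-- ===== CLAIM (what is proved, stated in full; the proofs are below) =====
def Claim_equal_get_user_selection : Prop := ∀ (line : String), Dom_get_user_selection line → Spec_get_user_selection line (get_user_selection line)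

-- ===== LEMMAS AND PROOFS =====

-- a non-whitespace char is in some piece of split₀.go iff it is in the remaining input, the current word, or the accumulator
theorem pv_splitgo_mem (c : Char) (h : PySem.Chars.isspace c = false) :
    ∀ (s cur : List Char) (acc : List (List Char)),
      ((∃ w ∈ PySem.Chars.split₀.go s cur acc, c ∈ w) ↔ c ∈ s ∨ c ∈ cur ∨ ∃ w ∈ acc, c ∈ w) := by
  intro s
  induction s with
  | nil =>
      intro cur acc
      by_cases hc : cur = []
      · subst hc; simp [PySem.Chars.split₀.go]
      · have hc' : cur.isEmpty = false := by simpa using hc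
        simp only [PySem.Chars.split₀.go, hc', Bool.false_eq_true, if_false]
        simp only [List.mem_reverse, List.mem_cons, List.not_mem_nil]
        constructor
        · rintro ⟨w, hw | hw, hcw⟩
          · subst hw; simp only [List.mem_reverse] at hcw; tauto
          · tauto
        · rintro (h' | h' | ⟨w, hw, hcw⟩)
          · exact absurd h' (by simp)
          · exact ⟨cur.reverse, Or.inl rfl, by simpa using h'⟩
          · exact ⟨w, Or.inr hw, hcw⟩
  | cons c' rest ih =>
      intro cur acc
      by_cases hsp : PySem.Chars.isspace c' = true
      · have hne : c ≠ c' := by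
          intro he; rw [he, hsp] at h; exact Bool.noConfusion h
        by_cases hc : cur = []
        · subst hc
          simp only [PySem.Chars.split₀.go, hsp, if_true, List.isEmpty_nil]
          rw [ih]
          simp [List.mem_cons, hne]
        · have hc' : cur.isEmpty = false := by simpa using hc
          simp only [PySem.Chars.split₀.go, hsp, if_true, hc', Bool.false_eq_true, if_false]
          rw [ih]
          simp only [List.mem_cons, hne, false_or]
          constructor
          · rintro (h' | h' | ⟨w, hw | hw, hcw⟩)
            · tauto
            · exact absurd h' (by simp)
            · subst hw; simp only [List.mem_reverse] at hcw; tauto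
            · tauto
          · rintro (h' | h' | ⟨w, hw, hcw⟩)
            · tauto
            · exact Or.inr (Or.inr ⟨cur.reverse, Or.inl rfl, by simpa using h'⟩)
            · exact Or.inr (Or.inr ⟨w, Or.inr hw, hcw⟩)
      · have hsp' : PySem.Chars.isspace c' = false := by simpa using hsp
        simp only [PySem.Chars.split₀.go, hsp', Bool.false_eq_true, if_false]
        rw [ih]
        simp only [List.mem_cons]
        tauto

-- a non-whitespace char is in some word of split() iff it is in the string
theorem pv_split_mem (c : Char) (h : PySem.Chars.isspace c = false) (s : List Char) :
    (∃ w ∈ PySem.Chars.split₀ s, c ∈ w) ↔ c ∈ s := by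
  have := pv_splitgo_mem c h s [] []
  simpa [PySem.Chars.split₀] using this

-- over the split columns, "letter in some column" equals "letter in the line", for non-whitespace letters
theorem pv_any_col (line : String) (c : Char) (h : PySem.Chars.isspace c = false) :
    (PySem.Str.split₀ line).any (fun col => PySem.Chars.isIn [c] col.toList)
      = PySem.Chars.isIn [c] line.toList := by
  rw [Bool.eq_iff_iff]
  rw [PySem.Chars.isIn_iff_infix, List.singleton_infix_iff,
    ← pv_split_mem c h line.toList, ← PySem.Str.split₀_map_toList]
  simp only [List.any_eq_true, PySem.Chars.isIn_iff_infix, List.singleton_infix_iff,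
    List.mem_map]
  constructor
  · rintro ⟨col, hcol, hc⟩
    exact ⟨col.toList, ⟨col, hcol, rfl⟩, hc⟩
  · rintro ⟨w, ⟨col, hcol, rfl⟩, hc⟩
    exact ⟨col, hcol, hc⟩

-- one step of A's table-building fold, in closed form on a literal 5-list
theorem pv_stepA_eq (a b c d e : Bool) (col : String) :
    pvStepA [a, b, c, d, e] col =
      [a || PySem.Str.isIn "A" col, b || PySem.Str.isIn "B" col, c || PySem.Str.isIn "C" col,
       d || PySem.Str.isIn "D" col, e || PySem.Str.isIn "E" col] := by
  simp only [pvStepA]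
  cases PySem.Str.isIn "A" col <;> cases PySem.Str.isIn "B" col <;>
    cases PySem.Str.isIn "C" col <;> cases PySem.Str.isIn "D" col <;>
    cases PySem.Str.isIn "E" col <;> simp [List.set]

-- A's whole table-building fold, in closed form
theorem pv_foldA (cols : List String) : ∀ (a b c d e : Bool),
    cols.foldl pvStepA [a, b, c, d, e] =
      [a || cols.any (fun col => PySem.Str.isIn "A" col),
       b || cols.any (fun col => PySem.Str.isIn "B" col),
       c || cols.any (fun col => PySem.Str.isIn "C" col),
       d || cols.any (fun col => PySem.Str.isIn "D" col),
       e || cols.any (fun col => PySem.Str.isIn "E" col)] := by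
  induction cols with
  | nil => intro a b c d e; simp
  | cons col cols ih =>
      intro a b c d e
      simp only [List.foldl_cons, pv_stepA_eq, ih, List.any_cons, Bool.or_assoc]

-- ===== VERDICT (by name: the statement is the Claim_ definition above) =====
theorem get_user_selection_spec : Claim_equal_get_user_selection := by
  intro line _
  unfold Spec_get_user_selection get_user_selection get_user_selection_alt
  have hr : PySem.List.pyRange 0 5 1 = [0, 1, 2, 3, 4] := by decide
  have hA : PySem.Str.isIn "A" = fun col => PySem.Chars.isIn ['A'] col.toList := rfl
  have hB : PySem.Str.isIn "B" = fun col => PySem.Chars.isIn ['B'] col.toList := rfl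
  have hC : PySem.Str.isIn "C" = fun col => PySem.Chars.isIn ['C'] col.toList := rfl
  have hD : PySem.Str.isIn "D" = fun col => PySem.Chars.isIn ['D'] col.toList := rfl
  have hE : PySem.Str.isIn "E" = fun col => PySem.Chars.isIn ['E'] col.toList := rfl
  have habc : "ABCDE".toList = ['A', 'B', 'C', 'D', 'E'] := by decide
  simp only [pv_foldA, Bool.false_or, hr, hA, hB, hC, hD, hE, habc,
    pv_any_col line 'A' (by decide), pv_any_col line 'B' (by decide),
    pv_any_col line 'C' (by decide), pv_any_col line 'D' (by decide),
    pv_any_col line 'E' (by decide), pvFirstMissing]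
  generalize PySem.Chars.isIn ['A'] line.toList = pA
  generalize PySem.Chars.isIn ['B'] line.toList = pB
  generalize PySem.Chars.isIn ['C'] line.toList = pC
  generalize PySem.Chars.isIn ['D'] line.toList = pD
  generalize PySem.Chars.isIn ['E'] line.toList = pE
  revert pA pB pC pD pE
  decide
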